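-- pv_equiv track=rewrite | github.com/HampusAstrom/ArsManager | character.py | separate_tech_and_form
-- ===== SOURCE A (Python) =====
-- def separate_tech_and_form(arts) -> tuple[dict, dict]:
--     t = ["Cr","In","Mu","Pe","Re",]
--     tech = {}
--     form = {}
--     for key, val in arts.items():
--         if key in t:
--             tech[key] = val
--         else:
--             form[key] = val
--     return tech, form
-- ===== SOURCE B (Python) =====
-- def separate_tech_and_form(arts) -> tuple[dict, dict]:
--     techniques = ("Cr", "In", "Mu", "Pe", "Re")
--     form = dict(arts)
--     tech = {key: form.pop(key) for key in arts if key in techniques}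
--     return tech, form
-- ===== Notes on version B (the rewrite author's own statement) =====
-- stated objective: alternative
-- what changed: Instead of A's single pass that partitions items into two fresh dicts, B copies the whole dict once and then moves the technique entries out of the copy with pop while building tech, so form is produced by deletion rather than accumulation.
import Mathlib
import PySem

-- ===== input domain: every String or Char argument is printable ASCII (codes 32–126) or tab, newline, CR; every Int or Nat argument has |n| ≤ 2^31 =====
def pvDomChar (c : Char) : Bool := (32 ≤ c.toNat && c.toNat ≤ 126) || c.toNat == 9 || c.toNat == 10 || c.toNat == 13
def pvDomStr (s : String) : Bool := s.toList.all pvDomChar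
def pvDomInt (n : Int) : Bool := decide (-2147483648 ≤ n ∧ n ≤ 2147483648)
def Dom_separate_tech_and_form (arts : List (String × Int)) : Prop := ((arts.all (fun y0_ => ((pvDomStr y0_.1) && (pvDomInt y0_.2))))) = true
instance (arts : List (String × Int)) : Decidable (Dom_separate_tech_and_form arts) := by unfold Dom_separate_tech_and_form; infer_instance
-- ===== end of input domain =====

-- B copies the whole dict once and then MOVES the technique entries out of the copy with pop,
-- instead of A's item-by-item partition into two fresh accumulators (objective: alternative, same cost).

-- the fixed technique-name list, shared by both sources
def pvTechList : List String := ["Cr", "In", "Mu", "Pe", "Re"]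

-- ===== PORT A =====
def separate_tech_and_form (arts : List (String × Int)) : (List (String × Int)) × (List (String × Int)) :=
  -- tech = {}; form = {}; for key, val in arts.items(): if key in t: tech[key] = val else: form[key] = val
  let r := arts.foldl
    (fun (st : PySem.Dict String Int × PySem.Dict String Int) kv =>
      if pvTechList.contains kv.1 then (st.1.insert kv.1 kv.2, st.2)
      else (st.1, st.2.insert kv.1 kv.2))
    (PySem.Dict.empty, PySem.Dict.empty)
  (r.1.items, r.2.items)

-- ===== PORT B =====
def separate_tech_and_form_alt (arts : List (String × Int)) : (List (String × Int)) × (List (String × Int)) :=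
  -- form = dict(arts)
  let form0 : PySem.Dict String Int := PySem.Dict.ofList arts
  -- tech = {key: form.pop(key) for key in arts if key in techniques}
  -- ('for key in arts' iterates the keys of the arts dict; the copy has exactly those keys)
  let st := form0.keys.foldl
    (fun (st : PySem.Dict String Int × PySem.Dict String Int) k =>
      if pvTechList.contains k then
        match st.2.pop? k with
        | some (v, f) => (st.1.insert k v, f)
        | none => st  -- unreachable: every iterated key is still in the copy (Python's pop would raise)
      else st)
    (PySem.Dict.empty, form0)
  (st.1.items, st.2.items)

-- ===== PRECONDITION & SPEC =====
def Spec_separate_tech_and_form (arts : List (String × Int)) (out : (List (String × Int)) × (List (String × Int))) : Prop := out = separate_tech_and_form_alt arts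
instance (arts : List (String × Int)) (out : (List (String × Int)) × (List (String × Int))) : Decidable (Spec_separate_tech_and_form arts out) := by unfold Spec_separate_tech_and_form; infer_instance

-- ===== CLAIM (what is proved, stated in full; the proofs are below) =====
def Claim_equal_separate_tech_and_form : Prop := ∀ (arts : List (String × Int)), Dom_separate_tech_and_form arts → Spec_separate_tech_and_form arts (separate_tech_and_form arts)

-- ===== LEMMAS AND PROOFS =====

-- A's single partition loop, split into the two filtered insert-folds (Dict.update) it interleaves.
lemma pvFoldA_split (c : String → Bool) (l : List (String × Int)) (t f : PySem.Dict String Int) :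
    l.foldl
      (fun (st : PySem.Dict String Int × PySem.Dict String Int) kv =>
        if c kv.1 then (st.1.insert kv.1 kv.2, st.2) else (st.1, st.2.insert kv.1 kv.2))
      (t, f)
    = (t.update (l.filter (fun kv => c kv.1)), f.update (l.filter (fun kv => !c kv.1))) := by
  induction l generalizing t f with
  | nil => simp [PySem.Dict.update]
  | cons kv l ih =>
    by_cases h : c kv.1 = true
    · simp [List.foldl_cons, h, ih, PySem.Dict.update]
    · simp [List.foldl_cons, h, ih, PySem.Dict.update]

lemma pvContains_update (l : List (String × Int)) (d : PySem.Dict String Int) (k : String) :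
    (d.update l).contains k = (d.contains k || l.any (fun kv => kv.1 == k)) := by
  induction l generalizing d with
  | nil => simp [PySem.Dict.update]
  | cons kv l ih =>
    simp only [PySem.Dict.update, List.foldl_cons] at *
    rw [ih]
    simp [PySem.Dict.contains_insert, BEq.comm, Bool.or_assoc, Bool.or_left_comm]

-- building the dict of a key-filtered item list = key-filtering the items of the dict
lemma pvUpdate_filter_items (c : String → Bool) (l : List (String × Int)) :
    ((PySem.Dict.empty : PySem.Dict String Int).update (l.filter (fun kv => c kv.1))).items
    = ((PySem.Dict.empty : PySem.Dict String Int).update l).items.filter (fun kv => c kv.1) := by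
  induction l using List.reverseRecOn with
  | nil => simp [PySem.Dict.update, PySem.Dict.empty]
  | append_singleton l kv ih =>
    have hupd : ∀ (L : List (String × Int)),
        (PySem.Dict.empty : PySem.Dict String Int).update (L ++ [kv])
        = ((PySem.Dict.empty : PySem.Dict String Int).update L).insert kv.1 kv.2 := by
      intro L; simp [PySem.Dict.update, List.foldl_append]
    have hpt : ∀ p : String × Int,
        c ((if (p.1 == kv.1) = true then (kv.1, kv.2) else p).1) = c p.1 := by
      intro p
      by_cases h : (p.1 == kv.1) = true
      · have : p.1 = kv.1 := by simpa using h
        simp [this]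
      · simp [h]
    by_cases hc : c kv.1 = true
    · rw [List.filter_append]
      by_cases hcont : ((PySem.Dict.empty : PySem.Dict String Int).update l).contains kv.1 = true
      · have hcontf : ((PySem.Dict.empty : PySem.Dict String Int).update
            (l.filter (fun p => c p.1))).contains kv.1 = true := by
          rw [pvContains_update] at hcont ⊢
          simp only [PySem.Dict.contains_empty, Bool.false_or] at hcont ⊢
          rw [List.any_filter]
          obtain ⟨x, hx, hbx⟩ := List.any_eq_true.mp hcont
          refine List.any_eq_true.mpr ⟨x, hx, ?_⟩
          have hx1 : x.1 = kv.1 := by simpa using hbx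
          simp [hx1, hc]
        have hL : ((l ++ [kv]).filter (fun p => c p.1)) = l.filter (fun p => c p.1) ++ [kv] := by
          simp [List.filter_append, hc]
        rw [← List.filter_append, hL, hupd,
          PySem.Dict.items_insert_of_contains _ _ hcontf, ih, hupd,
          PySem.Dict.items_insert_of_contains _ _ hcont, List.filter_map]
        congr 1
        exact List.filter_congr (fun p _ => (hpt p).symm)
      · have hcontF : ((PySem.Dict.empty : PySem.Dict String Int).update l).contains kv.1 = false := by
          simpa using hcont
        have hcontf : ((PySem.Dict.empty : PySem.Dict String Int).update
            (l.filter (fun p => c p.1))).contains kv.1 = false := by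
          rw [pvContains_update]
          rw [pvContains_update] at hcontF
          simp only [PySem.Dict.contains_empty, Bool.false_or] at hcontF ⊢
          rw [List.any_filter]
          simp only [List.any_eq_false] at hcontF ⊢
          intro x hx
          have := hcontF x hx
          simp at this ⊢
          exact fun _ => this
        have hL : ((l ++ [kv]).filter (fun p => c p.1)) = l.filter (fun p => c p.1) ++ [kv] := by
          simp [List.filter_append, hc]
        rw [← List.filter_append, hL, hupd,
          PySem.Dict.items_insert_of_not_contains _ _ hcontf, ih, hupd,
          PySem.Dict.items_insert_of_not_contains _ _ hcontF, List.filter_append]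
        simp [hc]
    · have hL : ((l ++ [kv]).filter (fun p => c p.1)) = l.filter (fun p => c p.1) := by
        simp [List.filter_append, hc]
      rw [hL, ih, hupd]
      by_cases hcont : ((PySem.Dict.empty : PySem.Dict String Int).update l).contains kv.1 = true
      · rw [PySem.Dict.items_insert_of_contains _ _ hcont, List.filter_map]
        have e1 : List.filter ((fun (kv' : String × Int) => c kv'.1) ∘
              fun p => if (p.1 == kv.1) = true then (kv.1, kv.2) else p)
              ((PySem.Dict.empty : PySem.Dict String Int).update l).items
            = List.filter (fun kv' => c kv'.1)
              ((PySem.Dict.empty : PySem.Dict String Int).update l).items :=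
          List.filter_congr (fun p _ => hpt p)
        rw [e1]
        refine ((List.map_congr_left ?_).trans (List.map_id _)).symm
        intro p hp
        have hcp : c p.1 = true := (List.mem_filter.mp hp).2
        cases hb : (p.1 == kv.1) with
        | false => simp
        | true =>
          have hx : p.1 = kv.1 := by simpa using hb
          rw [hx] at hcp
          exact absurd hcp hc
      · have hcontF : ((PySem.Dict.empty : PySem.Dict String Int).update l).contains kv.1 = false := by
          simpa using hcont
        rw [PySem.Dict.items_insert_of_not_contains _ _ hcontF, List.filter_append]
        simp [hc]

-- the moving loop of B: iterating the keys of the remaining items `m` (with `pre` the already-kept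
-- non-technique entries in front of them), each technique key is popped out of `form` into `tech`
lemma pvPhase2 (m pre : List (String × Int)) (t : PySem.Dict String Int)
    (hnd : ((pre ++ m).map Prod.fst).Nodup) :
    (m.map Prod.fst).foldl
      (fun (st : PySem.Dict String Int × PySem.Dict String Int) k =>
        if pvTechList.contains k then
          match st.2.pop? k with
          | some (v, f) => (st.1.insert k v, f)
          | none => st
        else st)
      (t, PySem.Dict.mk (pre ++ m))
    = (t.update (m.filter (fun kv => pvTechList.contains kv.1)),
       PySem.Dict.mk (pre ++ m.filter (fun kv => !pvTechList.contains kv.1))) := by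
  induction m generalizing pre t with
  | nil => simp [PySem.Dict.update]
  | cons kv m' ih =>
    rw [List.map_append, List.map_cons] at hnd
    obtain ⟨hnp, hnc, hdisj⟩ := List.nodup_append.mp hnd
    have hpre : kv.1 ∉ pre.map Prod.fst := fun h => hdisj _ h _ List.mem_cons_self rfl
    have hm' : kv.1 ∉ m'.map Prod.fst := (List.nodup_cons.mp hnc).1
    have hnd' : ((pre ++ m').map Prod.fst).Nodup := by
      rw [List.map_append]
      exact List.nodup_append.mpr ⟨hnp, (List.nodup_cons.mp hnc).2,
        fun a ha b hb => hdisj a ha b (List.mem_cons_of_mem _ hb)⟩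
    have fpre : pre.filter (fun p => !(p.1 == kv.1)) = pre :=
      List.filter_eq_self.mpr (fun x hx => by
        simp only [Bool.not_eq_eq_eq_not, Bool.not_true, beq_eq_false_iff_ne, ne_eq]
        intro h; exact hpre (h ▸ List.mem_map_of_mem hx))
    have fm' : m'.filter (fun p => !(p.1 == kv.1)) = m' :=
      List.filter_eq_self.mpr (fun x hx => by
        simp only [Bool.not_eq_eq_eq_not, Bool.not_true, beq_eq_false_iff_ne, ne_eq]
        intro h; exact hm' (h ▸ List.mem_map_of_mem hx))
    by_cases hc : pvTechList.contains kv.1 = true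
    · have hfind : List.find? (fun p => p.1 == kv.1) (pre ++ kv :: m') = some kv := by
        rw [List.find?_append]
        have hn : List.find? (fun p => p.1 == kv.1) pre = none := by
          rw [List.find?_eq_none]
          intro x hx
          simp only [beq_eq_false_iff_ne, ne_eq, Bool.not_eq_true]
          intro h; exact hpre (h ▸ List.mem_map_of_mem hx)
        rw [hn]
        simp
      have hpop : (PySem.Dict.mk (pre ++ kv :: m') : PySem.Dict String Int).pop? kv.1
          = some (kv.2, PySem.Dict.mk (pre ++ m')) := by
        simp only [PySem.Dict.pop?, PySem.Dict.get?, hfind, Option.map_some]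
        simp only [PySem.Dict.erase, List.filter_append, List.filter_cons, fpre, fm']
        simp
      have hmem : kv.1 ∈ pvTechList := by simpa using hc
      simp only [List.map_cons, List.foldl_cons, if_pos hc, hpop]
      rw [ih _ _ hnd']
      simp [hmem, PySem.Dict.update]
    · have hre : pre ++ kv :: m' = (pre ++ [kv]) ++ m' := by simp
      simp only [List.map_cons, List.foldl_cons, if_neg hc]
      have hnmem : kv.1 ∉ pvTechList := by simpa using hc
      rw [hre, ih (pre ++ [kv]) t (by rw [← hre, List.map_append, List.map_cons]; exact hnd)]
      simp [hnmem, List.append_assoc]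

-- folding a fresh, key-nodup item list into the empty dict reproduces exactly that list
lemma pvUpdate_empty_items (l : List (String × Int)) (h : (l.map Prod.fst).Nodup) :
    ((PySem.Dict.empty : PySem.Dict String Int).update l).items = l := by
  have := PySem.Dict.items_foldl_insert_fresh l Prod.fst Prod.snd (PySem.Dict.empty : PySem.Dict String Int)
    (fun a _ => rfl) h
  simpa [PySem.Dict.update] using this

-- ===== VERDICT (by name: the statement is the Claim_ definition above) =====
theorem separate_tech_and_form_spec : Claim_equal_separate_tech_and_form := by
  intro arts _
  unfold Spec_separate_tech_and_form
  have hndk : (((PySem.Dict.empty : PySem.Dict String Int).update arts).items.map Prod.fst).Nodup :=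
    PySem.Dict.nodup_keys_ofList arts
  have hP := pvPhase2 ((PySem.Dict.empty : PySem.Dict String Int).update arts).items []
    PySem.Dict.empty (by simpa using hndk)
  simp only [List.nil_append] at hP
  have hB : separate_tech_and_form_alt arts
      = (((PySem.Dict.empty : PySem.Dict String Int).update
            ((((PySem.Dict.empty : PySem.Dict String Int).update arts).items).filter
              (fun kv => pvTechList.contains kv.1))).items,
         (((PySem.Dict.empty : PySem.Dict String Int).update arts).items).filter
              (fun kv => !pvTechList.contains kv.1)) :=
    congrArg (fun st : PySem.Dict String Int × PySem.Dict String Int => (st.1.items, st.2.items)) hP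
  have hA : separate_tech_and_form arts
      = (((PySem.Dict.empty : PySem.Dict String Int).update
            (arts.filter (fun kv => pvTechList.contains kv.1))).items,
         ((PySem.Dict.empty : PySem.Dict String Int).update
            (arts.filter (fun kv => !pvTechList.contains kv.1))).items) := by
    unfold separate_tech_and_form
    rw [pvFoldA_split]
  have hndf : (((((PySem.Dict.empty : PySem.Dict String Int).update arts).items).filter
      (fun kv => pvTechList.contains kv.1)).map Prod.fst).Nodup :=
    List.Nodup.sublist (List.Sublist.map Prod.fst List.filter_sublist) hndk
  rw [hA, hB, pvUpdate_filter_items (fun s => pvTechList.contains s) arts,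
    pvUpdate_filter_items (fun s => !pvTechList.contains s) arts,
    pvUpdate_empty_items _ hndf]
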